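-- pv_equiv track=rewrite | github.com/cocomcocom/tailorsorg | tailoringapp/views.py | dimensionhandler
-- ===== SOURCE A (Python) =====
-- def dimensionhandler(allsamples):
--
--     defaultleft = 0
--
--     defaulttop = 0
--
--     dimensionskeeper = []
--
--     start = "locked"
--
--     for sides in range(allsamples):
--
--         dimensionskeeper += [[defaulttop, defaultleft]]
--
--         if start:
--
--             defaultleft += 330
--
--             start = None
--
--             continue
--
--         if not start:
--
--             defaulttop += 210
--
--             defaultleft = 0
--
--             start = "locked"
--
--     return dimensionskeeper
-- ===== SOURCE B (Python) =====
-- def dimensionhandler(allsamples):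
--     return [[210 * (i // 2), 330 * (i % 2)] for i in range(allsamples)]
-- ===== Notes on version B (the rewrite author's own statement) =====
-- stated objective: simpler
-- what changed: A's alternating state machine (top/left accumulators plus a 'locked' flag with continue) is replaced by a stateless closed form per index: element i is [210*(i//2), 330*(i%2)].
import Mathlib
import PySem

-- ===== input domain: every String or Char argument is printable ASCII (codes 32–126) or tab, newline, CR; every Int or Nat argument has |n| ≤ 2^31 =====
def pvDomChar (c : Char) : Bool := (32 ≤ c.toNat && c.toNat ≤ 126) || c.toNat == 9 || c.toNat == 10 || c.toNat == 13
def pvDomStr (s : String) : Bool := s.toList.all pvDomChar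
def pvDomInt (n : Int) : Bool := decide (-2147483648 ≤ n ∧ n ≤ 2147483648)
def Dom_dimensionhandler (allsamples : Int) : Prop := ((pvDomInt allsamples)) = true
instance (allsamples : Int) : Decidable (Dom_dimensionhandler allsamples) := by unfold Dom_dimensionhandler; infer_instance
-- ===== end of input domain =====

-- B replaces A's alternating state machine (top/left accumulators + "locked" flag) by a
-- stateless closed form per index: element i is [210*(i//2), 330*(i%2)] (objective: simpler).


-- ===== PORT A =====
-- one loop iteration: append [top,left]; if start, bump left and clear the flag
-- (Python's `continue`), else bump top, reset left, restore the flag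
def dimensionhandlerStep (st : List (List Int) × Int × Int × Bool) (_ : Int) :
    List (List Int) × Int × Int × Bool :=
  let keeper := st.1 ++ [[st.2.1, st.2.2.1]]
  if st.2.2.2 then (keeper, st.2.1, st.2.2.1 + 330, false)
  else (keeper, st.2.1 + 210, 0, true)

def dimensionhandler (allsamples : Int) : List (List Int) :=
  ((PySem.List.pyRange 0 allsamples 1).foldl dimensionhandlerStep ([], 0, 0, true)).1

-- ===== PORT B =====
def dimensionhandler_alt (allsamples : Int) : List (List Int) :=
  (PySem.List.pyRange 0 allsamples 1).map
    (fun i => [210 * PySem.Int.floordiv i 2, 330 * PySem.Int.mod i 2])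

-- ===== PRECONDITION & SPEC =====
def Spec_dimensionhandler (allsamples : Int) (out : List (List Int)) : Prop := out = dimensionhandler_alt allsamples
instance (allsamples : Int) (out : List (List Int)) : Decidable (Spec_dimensionhandler allsamples out) := by unfold Spec_dimensionhandler; infer_instance

-- ===== CLAIM (what is proved, stated in full; the proofs are below) =====
def Claim_equal_dimensionhandler : Prop := ∀ (allsamples : Int), Dom_dimensionhandler allsamples → Spec_dimensionhandler allsamples (dimensionhandler allsamples)

-- ===== LEMMAS AND PROOFS =====
-- closed form of one output element, indexed by a Nat
def dhCell (k : Nat) : List Int := [210 * ((k / 2 : Nat) : Int), 330 * ((k % 2 : Nat) : Int)]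

-- loop invariant: after m iterations the whole state is a closed form of m
lemma dh_loop (m : Nat) :
    (List.range m).foldl (fun st (k : Nat) => dimensionhandlerStep st k) ([], 0, 0, true)
      = ((List.range m).map dhCell,
         210 * ((m / 2 : Nat) : Int), 330 * ((m % 2 : Nat) : Int), decide (m % 2 = 0)) := by
  induction m with
  | zero => simp
  | succ m ih =>
      rw [List.range_succ, List.foldl_append, ih]
      rcases Nat.even_or_odd m with ⟨j, hj⟩ | ⟨j, hj⟩
      · have h2 : m % 2 = 0 := by omega
        simp [dimensionhandlerStep, dhCell, h2]
        refine ⟨by omega, ?_, by omega⟩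
        have : m / 2 = (m+1)/2 := by omega
        omega
      · have h2 : m % 2 = 1 := by omega
        simp [dimensionhandlerStep, dhCell, h2]
        refine ⟨by omega, ?_, by omega⟩
        have : (m + 1) / 2 = m / 2 + 1 := by omega
        omega

-- ===== VERDICT (by name: the statement is the Claim_ definition above) =====
theorem dimensionhandler_spec : Claim_equal_dimensionhandler := by
  intro n _
  unfold Spec_dimensionhandler dimensionhandler dimensionhandler_alt
  rw [PySem.List.pyRange_one]
  rw [List.foldl_map]
  simp only [zero_add]
  rw [dh_loop]
  simp [dhCell, List.map_map, Function.comp]
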